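-- pv_equiv track=rewrite | github.com/jiajunhe98/Advent-of-Code-2021 | day16.py | process_list_2
-- ===== SOURCE A (Python) =====
-- def process_list_2(nested_list, oper):
--     while nested_list:
--         nested_list[-1] -= 1
--         if nested_list[-1] == 0:
--             nested_list.pop(-1)
--             oper.append(")")
--         else:
--             break
--     return nested_list
-- ===== SOURCE B (Python) =====
-- def process_list_2(nested_list, oper):
--     # Forward scan: cut = index just past the LAST element != 1 (0 if all are 1).
--     # Everything after cut is a run of trailing 1s that A would pop; close each level,
--     # truncate in place, and decrement the surviving last counter.
--     cut = 0
--     for i, x in enumerate(nested_list):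
--         if x != 1:
--             cut = i + 1
--     oper.extend([")"] * (len(nested_list) - cut))
--     del nested_list[cut:]
--     if nested_list:
--         nested_list[-1] -= 1
--     return nested_list
-- ===== Notes on version B (the rewrite author's own statement) =====
-- stated objective: alternative
-- what changed: Replaces the backwards decrement-test-pop-break loop with a single forward scan that computes the index past the last non-1 counter, then truncates the list there in bulk, extends oper with that many close parens at once, and decrements the surviving last counter.
import Mathlib
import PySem

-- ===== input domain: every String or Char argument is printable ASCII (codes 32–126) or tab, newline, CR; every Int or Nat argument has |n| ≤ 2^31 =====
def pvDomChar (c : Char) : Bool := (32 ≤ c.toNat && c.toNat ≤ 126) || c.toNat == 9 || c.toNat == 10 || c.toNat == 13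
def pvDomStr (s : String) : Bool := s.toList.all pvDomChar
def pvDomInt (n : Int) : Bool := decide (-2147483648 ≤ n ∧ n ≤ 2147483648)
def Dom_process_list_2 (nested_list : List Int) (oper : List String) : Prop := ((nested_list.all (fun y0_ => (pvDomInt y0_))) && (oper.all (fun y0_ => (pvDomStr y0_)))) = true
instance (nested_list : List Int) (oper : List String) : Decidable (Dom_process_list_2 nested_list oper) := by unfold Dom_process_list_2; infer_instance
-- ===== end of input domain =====

-- ===== PORT A =====
-- A mutates nested_list and oper in place; this equivalence is about the RETURN value
-- (B performs the same mutations in Python). A's loop works on the tail of the list,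
-- so the port recurses on the reversed list.
def pvGoA : List Int → List Int
  | [] => []
  | x :: rest => if x - 1 == 0 then pvGoA rest else (x - 1) :: rest

def process_list_2 (nested_list : List Int) (oper : List String) : List Int :=
  (pvGoA nested_list.reverse).reverse

-- ===== PORT B =====
-- B: forward scan computing cut = index past the last element ≠ 1 (the for-loop),
-- then truncate to cut and decrement the last surviving element.
def pvCut : List Int → Nat → Nat → Nat
  | [], _, acc => acc
  | x :: rest, i, acc => pvCut rest (i + 1) (if x ≠ 1 then i + 1 else acc)

def pvDecLast : List Int → List Int
  | [] => []
  | [x] => [x - 1]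
  | x :: y :: rest => x :: pvDecLast (y :: rest)

def process_list_2_alt (nested_list : List Int) (oper : List String) : List Int :=
  pvDecLast (nested_list.take (pvCut nested_list 0 0))

-- ===== PRECONDITION & SPEC =====
def Spec_process_list_2 (nested_list : List Int) (oper : List String) (out : List Int) : Prop := out = process_list_2_alt nested_list oper
instance (nested_list : List Int) (oper : List String) (out : List Int) : Decidable (Spec_process_list_2 nested_list oper out) := by unfold Spec_process_list_2; infer_instance

-- ===== CLAIM (what is proved, stated in full; the proofs are below) =====
def Claim_equal_process_list_2 : Prop := ∀ (nested_list : List Int) (oper : List String), Dom_process_list_2 nested_list oper → Spec_process_list_2 nested_list oper (process_list_2 nested_list oper)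

-- ===== LEMMAS AND PROOFS =====
theorem pvCut_append (l : List Int) (x : Int) : ∀ i acc,
    pvCut (l ++ [x]) i acc = if x ≠ 1 then i + l.length + 1 else pvCut l i acc := by
  induction l with
  | nil => intro i acc; simp [pvCut]
  | cons y rest ih =>
    intro i acc
    simp only [List.cons_append, pvCut, ih, List.length_cons]
    split_ifs <;> omega

theorem pvCut_le (l : List Int) : ∀ i acc, acc ≤ i → pvCut l i acc ≤ i + l.length := by
  induction l with
  | nil => intro i acc h; simpa [pvCut] using h
  | cons y rest ih =>
    intro i acc h
    simp only [pvCut, List.length_cons]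
    split_ifs with hy
    · have := ih (i + 1) (i + 1) (le_refl _); omega
    · have := ih (i + 1) acc (by omega); omega

theorem pvDecLast_append (l : List Int) (x : Int) : pvDecLast (l ++ [x]) = l ++ [x - 1] := by
  induction l with
  | nil => rfl
  | cons y rest ih =>
    cases rest with
    | nil => simp [pvDecLast]
    | cons z r => simpa [pvDecLast] using ih

theorem main_eq (l : List Int) : (pvGoA l.reverse).reverse = pvDecLast (l.take (pvCut l 0 0)) := by
  induction l using List.reverseRecOn with
  | nil => rfl
  | append_singleton l' x ih =>
    by_cases hx : x = 1
    · subst hx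
      have hle : pvCut l' 0 0 ≤ l'.length := by simpa using pvCut_le l' 0 0 (le_refl _)
      simp only [List.reverse_append, List.reverse_cons, List.reverse_nil, List.nil_append,
        List.cons_append, pvGoA]
      simp only [pvCut_append]
      simp only [show ((1 : Int) ≠ 1) = False by simp, if_false]
      rw [List.take_append_of_le_length hle]
      simpa using ih
    · have h1 : (x - 1 == 0) = false := by simp; omega
      simp only [List.reverse_append, List.reverse_cons, List.reverse_nil, List.nil_append,
        List.cons_append, pvGoA, h1, if_false]
      rw [pvCut_append]
      simp only [hx, ne_eq, not_false_iff, if_true]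
      have : (l' ++ [x]).take (0 + l'.length + 1) = l' ++ [x] := by
        apply List.take_of_length_le; simp
      rw [this, pvDecLast_append]
      simp

-- ===== VERDICT (by name: the statement is the Claim_ definition above) =====
theorem process_list_2_spec : Claim_equal_process_list_2 := by
  intro nl oper _
  unfold Spec_process_list_2 process_list_2 process_list_2_alt
  exact main_eq nl
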